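-- pv_equiv track=rewrite | github.com/Maximus690/CS110 | Documents/Pycharm/CS110/unit 5/homework5d/blue_score.py | blue_score_dict
-- ===== SOURCE A (Python) =====
-- from string import punctuation
--
-- def blue_score_dict(lst_phrases: list[str]) -> dict:
--     blue_dict = {}
--     for phrase in lst_phrases:
--         blue_score = calculate_blue_score(phrase)
--         if blue_score not in blue_dict:
--             blue_dict[blue_score] = []
--         blue_dict[blue_score].append(phrase)
--     return blue_dict
--
-- def calculate_blue_score(phrase: str) -> int:
--     blue_words = ["byu", "cougar", "cougars", "blue"]
--     total = 0
--     for word in phrase.split():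
--         if word.lower().strip(punctuation) in blue_words:
--             total += 1
--     return total
-- ===== SOURCE B (Python) =====
-- from string import punctuation
--
-- _BLUE = {"byu", "cougar", "cougars", "blue"}
--
--
-- def _score(phrase):
--     return sum(w.lower().strip(punctuation) in _BLUE for w in phrase.split())
--
--
-- def blue_score_dict(lst_phrases):
--     scored = [(_score(p), p) for p in lst_phrases]
--     keys = list(dict.fromkeys(s for s, _ in scored))
--     return {s: [p for t, p in scored if t == s] for s in keys}
-- ===== Notes on version B (the rewrite author's own statement) =====
-- stated objective: alternative
-- what changed: Replaces A's incremental dict-bucket maintenance (check-insert-append per phrase) with score-once into (score, phrase) pairs, dedup of the scores in first-occurrence order, then one gather-by-filter dict comprehension; the scorer becomes a sum over a generator with set membership.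
import Mathlib
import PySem

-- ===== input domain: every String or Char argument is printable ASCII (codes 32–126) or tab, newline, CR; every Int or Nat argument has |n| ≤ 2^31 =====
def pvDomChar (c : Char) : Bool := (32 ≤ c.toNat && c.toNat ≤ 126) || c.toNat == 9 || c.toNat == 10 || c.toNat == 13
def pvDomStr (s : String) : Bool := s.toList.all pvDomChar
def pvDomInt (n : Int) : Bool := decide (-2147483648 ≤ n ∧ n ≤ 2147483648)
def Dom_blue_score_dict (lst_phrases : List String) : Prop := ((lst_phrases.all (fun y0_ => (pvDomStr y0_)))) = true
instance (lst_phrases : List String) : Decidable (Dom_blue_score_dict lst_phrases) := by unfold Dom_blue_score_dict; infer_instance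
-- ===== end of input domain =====

-- B replaces A's incremental bucket maintenance by score-once / dedup-keys / gather-by-filter (objective: alternative, same asymptotics).

-- string.punctuation
def pvPunct : String := "!\"#$%&'()*+,-./:;<=>?@[\\]^_`{|}~"

-- ===== PORT A =====
def calculate_blue_score (phrase : String) : Int :=
  let blue_words : List String := ["byu", "cougar", "cougars", "blue"]
  (PySem.Str.split₀ phrase).foldl
    (fun total word =>
      if blue_words.contains (PySem.Str.stripChars (PySem.Str.lower word) pvPunct)
      then total + 1 else total) 0

def blue_score_dict (lst_phrases : List String) : List (Int × List String) :=
  (lst_phrases.foldl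
    (fun blue_dict phrase =>
      let blue_score := calculate_blue_score phrase
      let blue_dict :=
        if blue_dict.contains blue_score then blue_dict
        else blue_dict.insert blue_score ([] : List String)
      blue_dict.modify blue_score [] (· ++ [phrase]))
    PySem.Dict.empty).items

-- ===== PORT B =====
def pvBlueSet : PySem.Set String := PySem.Set.ofList ["byu", "cougar", "cougars", "blue"]

def pvScore (phrase : String) : Int :=
  ((PySem.Str.split₀ phrase).map
    (fun w => if PySem.Set.contains pvBlueSet (PySem.Str.stripChars (PySem.Str.lower w) pvPunct)
              then (1 : Int) else 0)).sum

def blue_score_dict_alt (lst_phrases : List String) : List (Int × List String) :=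
  let scored := lst_phrases.map (fun p => (pvScore p, p))
  let keys := PySem.List.dedup (scored.map (·.1))
  keys.map (fun s => (s, (scored.filter (fun t => t.1 == s)).map (·.2)))

-- ===== PRECONDITION & SPEC =====
def Spec_blue_score_dict (lst_phrases : List String) (out : List (Int × List String)) : Prop := out = blue_score_dict_alt lst_phrases
instance (lst_phrases : List String) (out : List (Int × List String)) : Decidable (Spec_blue_score_dict lst_phrases out) := by unfold Spec_blue_score_dict; infer_instance

-- ===== CLAIM (what is proved, stated in full; the proofs are below) =====
def Claim_equal_blue_score_dict : Prop := ∀ (lst_phrases : List String), Dom_blue_score_dict lst_phrases → Spec_blue_score_dict lst_phrases (blue_score_dict lst_phrases)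

-- ===== LEMMAS AND PROOFS =====

-- The two scoring helpers agree.
theorem score_eq (phrase : String) : calculate_blue_score phrase = pvScore phrase := by
  unfold calculate_blue_score pvScore
  rw [PySem.List.foldl_if_add_one, PySem.List.sum_map_ite_one_zero]
  simp [pvBlueSet, PySem.Set.contains, PySem.Set.ofList]

-- A's "if missing insert []; then append" step is one modify.
theorem step_eq (d : PySem.Dict Int (List String)) (s : Int) (p : String) :
    (if d.contains s then d else d.insert s ([] : List String)).modify s [] (· ++ [p])
      = d.modify s [] (· ++ [p]) := by
  by_cases h : d.contains s
  · simp [h]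
  · simp only [Bool.not_eq_true] at h
    simp [h, PySem.Dict.modify, PySem.Dict.getD_insert_self,
      PySem.Dict.insert_insert_self, PySem.Dict.getD_of_not_contains d _ h]

-- ===== VERDICT (by name: the statement is the Claim_ definition above) =====
theorem blue_score_dict_spec : Claim_equal_blue_score_dict := by
  intro lst _
  unfold Spec_blue_score_dict blue_score_dict blue_score_dict_alt
  have hfold : lst.foldl
      (fun blue_dict phrase =>
        let blue_score := calculate_blue_score phrase
        let blue_dict :=
          if blue_dict.contains blue_score then blue_dict
          else blue_dict.insert blue_score ([] : List String)
        blue_dict.modify blue_score [] (· ++ [phrase]))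
      PySem.Dict.empty
      = lst.foldl (fun d phrase => d.modify (pvScore phrase) [] (· ++ [phrase]))
          PySem.Dict.empty := by
    refine PySem.List.foldl_congr_mem _ _ _ _ (fun d phrase _ => ?_)
    simp only [score_eq, step_eq]
  rw [hfold]
  have hnd : (lst.foldl (fun d phrase => d.modify (pvScore phrase) [] (· ++ [phrase]))
      PySem.Dict.empty).keys.Nodup :=
    PySem.Dict.nodup_keys_foldl_modify_key lst pvScore []
      (fun _ phrase v => v ++ [phrase]) PySem.Dict.empty (by simp [pysem])
  rw [PySem.Dict.items_eq_map_keys _ hnd []]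
  have hkeys : (lst.foldl (fun d phrase => d.modify (pvScore phrase) [] (· ++ [phrase]))
      PySem.Dict.empty).keys
      = PySem.List.dedup ((lst.map (fun p => (pvScore p, p))).map (·.1)) := by
    rw [PySem.Dict.keys_foldl_modify_key lst pvScore [] (fun _ phrase v => v ++ [phrase])]
    simp [pysem, PySem.Set.update, PySem.Set.ofList, List.map_map, Function.comp_def]
  rw [hkeys]
  refine List.map_congr_left (fun k _ => ?_)
  have := PySem.Dict.getD_foldl_modify_append (lst.map (fun p => (pvScore p, p)))
      PySem.Dict.empty k
  rw [List.foldl_map] at this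
  simp only [this, PySem.Dict.getD_empty, List.nil_append]
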